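-- pv_equiv track=rewrite | github.com/espressif/esp-gmf | packages/esp_board_manager/test_apps/test_scripts/test_c_initializer_indentation.py | _extract_struct_block
-- ===== SOURCE A (Python) =====
-- def _extract_struct_block(lines, struct_marker: str):
--     start = None
--     for idx, line in enumerate(lines):
--         if struct_marker in line:
--             start = idx
--             break
--     if start is None:
--         raise AssertionError(f'Struct marker not found: {struct_marker}')
--
--     for end in range(start + 1, len(lines)):
--         if lines[end].strip() == '};':
--             return lines[start:end + 1]
--     raise AssertionError(f'Struct block not terminated: {struct_marker}')
-- ===== SOURCE B (Python) =====
-- def _extract_struct_block(lines, struct_marker: str):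
--     # Recursive structural decomposition: peel lines off the front until the
--     # marker line, then cons the block together front-to-back up to the '};'
--     # line; no indices, no slicing.
--     if not lines:
--         raise AssertionError(f'Struct marker not found: {struct_marker}')
--     head, rest = lines[0], lines[1:]
--     if struct_marker in head:
--         return [head] + _take_until_close(rest, struct_marker)
--     return _extract_struct_block(rest, struct_marker)
--
--
-- def _take_until_close(lines, struct_marker: str):
--     if not lines:
--         raise AssertionError(f'Struct block not terminated: {struct_marker}')
--     head, rest = lines[0], lines[1:]
--     if head.strip() == '};':
--         return [head]
--     return [head] + _take_until_close(rest, struct_marker)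
-- ===== Notes on version B (the rewrite author's own statement) =====
-- stated objective: alternative
-- what changed: A's index-based pair of scans plus a lines[start:end+1] slice is replaced by a recursive decomposition: peel lines off the front until the marker line, then a second recursive helper conses the block together front-to-back up to the '};' line, with no indices or slicing at all.
import Mathlib
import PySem

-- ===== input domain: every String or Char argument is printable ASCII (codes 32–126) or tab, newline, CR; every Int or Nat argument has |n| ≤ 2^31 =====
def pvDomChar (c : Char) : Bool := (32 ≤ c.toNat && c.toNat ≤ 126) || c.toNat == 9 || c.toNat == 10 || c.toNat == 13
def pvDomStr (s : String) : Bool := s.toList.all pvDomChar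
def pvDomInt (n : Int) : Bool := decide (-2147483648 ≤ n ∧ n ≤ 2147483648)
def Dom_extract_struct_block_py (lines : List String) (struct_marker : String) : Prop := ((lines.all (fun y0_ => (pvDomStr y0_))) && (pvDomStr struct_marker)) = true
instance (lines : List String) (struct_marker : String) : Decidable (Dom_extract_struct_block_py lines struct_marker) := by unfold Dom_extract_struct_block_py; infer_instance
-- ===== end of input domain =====

-- B replaces A's index-based scans and slice with a recursive decomposition that
-- conses the block together; return values agree everywhere A returns.

-- ===== PORT A =====
-- first loop: index of first line containing the marker (none = AssertionError, excluded by Pre_)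
def pvAStart (lines : List String) (struct_marker : String) (idx : Nat) : Option Nat :=
  match lines with
  | [] => none
  | l :: ls => if PySem.Str.isIn struct_marker l then some idx else pvAStart ls struct_marker (idx + 1)

-- second loop: for end in range(start+1, len(lines)), indexing lines[end] ([] = AssertionError, excluded by Pre_)
def pvAEnd (lines : List String) (start : Nat) (j : Nat) : List String :=
  if h : j < lines.length then
    if PySem.Str.strip lines[j] = "};" then
      PySem.List.slice lines (some (start : Int)) (some ((j : Int) + 1))
    else pvAEnd lines start (j + 1)
  else []
termination_by lines.length - j

def extract_struct_block_py (lines : List String) (struct_marker : String) : List String :=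
  match pvAStart lines struct_marker 0 with
  | none => []  -- Python raises AssertionError here; Pre_ excludes it
  | some s => pvAEnd lines s (s + 1)

-- ===== PORT B =====
-- _take_until_close: cons lines up to and including the '};' line (none = AssertionError, excluded by Pre_)
def pvTakeClose (lines : List String) : Option (List String) :=
  match lines with
  | [] => none
  | head :: rest =>
      if PySem.Str.strip head = "};" then some [head]
      else (pvTakeClose rest).map (head :: ·)

-- _extract_struct_block: peel lines until the marker line, then take until close (none = AssertionError)
def pvExtract (lines : List String) (struct_marker : String) : Option (List String) :=
  match lines with
  | [] => none
  | head :: rest =>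
      if PySem.Str.isIn struct_marker head then (pvTakeClose rest).map (head :: ·)
      else pvExtract rest struct_marker

def extract_struct_block_py_alt (lines : List String) (struct_marker : String) : List String :=
  (pvExtract lines struct_marker).getD []  -- none = Python raises; Pre_ excludes it

-- ===== PRECONDITION & SPEC =====
-- Pre_ holds exactly when A returns: some line contains the marker and a strictly later line strips to '};'
-- (equivalently for the FIRST marker line, since any witness pair bounds it); otherwise A raises AssertionError.
def Pre_extract_struct_block_py (lines : List String) (struct_marker : String) : Prop :=
  ∃ i < lines.length, ∃ j < lines.length, i < j ∧
    PySem.Str.isIn struct_marker (lines.getD i "") = true ∧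
    PySem.Str.strip (lines.getD j "") = "};"
instance (lines : List String) (struct_marker : String) : Decidable (Pre_extract_struct_block_py lines struct_marker) := by unfold Pre_extract_struct_block_py; infer_instance

def pvWitness_extract_struct_block_py : List String × String :=
  (["struct foo = {", "  .a = 1,", "};"], "struct foo")

def Spec_extract_struct_block_py (lines : List String) (struct_marker : String) (out : List String) : Prop := out = extract_struct_block_py_alt lines struct_marker
instance (lines : List String) (struct_marker : String) (out : List String) : Decidable (Spec_extract_struct_block_py lines struct_marker out) := by unfold Spec_extract_struct_block_py; infer_instance

-- ===== CLAIM (what is proved, stated in full; the proofs are below) =====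
def Claim_equal_extract_struct_block_py : Prop := ∀ (lines : List String) (struct_marker : String), Dom_extract_struct_block_py lines struct_marker → Pre_extract_struct_block_py lines struct_marker → Spec_extract_struct_block_py lines struct_marker (extract_struct_block_py lines struct_marker)

-- ===== LEMMAS AND PROOFS =====

-- A's second loop from j equals the slice lines[s:j] prefixed to B's cons pass over lines.drop j.
theorem pvAEnd_eq_takeClose (full : List String) (s : Nat) :
    ∀ (rest : List String) (j : Nat), rest = full.drop j → s ≤ j →
      pvAEnd full s j =
        (match pvTakeClose rest with
         | none => []
         | some out => (full.drop s).take (j - s) ++ out) := by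
  intro rest
  induction rest with
  | nil =>
      intro j h _
      have hlen : full.length ≤ j := by
        by_contra hc
        have := List.drop_eq_nil_iff.mp h.symm
        omega
      rw [pvAEnd]
      simp [pvTakeClose, Nat.not_lt.mpr hlen]
  | cons l ls ih =>
      intro j h hsj
      have hj : j < full.length := by
        by_contra hc
        simp [List.drop_eq_nil_of_le (Nat.le_of_not_lt hc)] at h
      have hget : full[j] = l := by
        have : (full.drop j)[0]'(by rw [← h]; simp) = l := by simp [← h]
        simpa using this
      have hdrop : ls = full.drop (j + 1) := by
        have : (full.drop j).tail = full.drop (j + 1) := by rw [List.tail_drop]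
        rw [← this, ← h]; rfl
      have hsplit : (full.drop s).take (j + 1 - s) = (full.drop s).take (j - s) ++ [l] := by
        have h1 : j + 1 - s = (j - s) + 1 := by omega
        rw [h1, ← hget, List.take_add_one]
        have h2 : (full.drop s)[j - s]? = some full[j] := by
          rw [List.getElem?_drop]
          have h3 : s + (j - s) = j := by omega
          rw [h3, List.getElem?_eq_getElem hj]
        simp [h2]
      rw [pvAEnd]
      simp only [hj, dif_pos, hget]
      by_cases hs : PySem.Str.strip l = "};"
      · simp only [pvTakeClose, hs, if_pos]
        have hcast : ((j : Int) + 1) = (((j + 1 : Nat) : Int)) := by push_cast; ring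
        rw [hcast, PySem.List.slice_natCast, hsplit]
      · simp only [pvTakeClose, hs, ite_false]
        rw [ih (j + 1) hdrop (by omega)]
        cases htc : pvTakeClose ls with
        | none => simp
        | some out => simp [hsplit]

-- B's top recursion splits into A's first loop followed by A's second loop.
theorem pvExtract_eq (full : List String) (m : String) :
    ∀ (rest : List String) (idx : Nat), rest = full.drop idx →
      (pvExtract rest m).getD [] =
        (match pvAStart rest m idx with
         | none => []
         | some s => pvAEnd full s (s + 1)) := by
  intro rest
  induction rest with
  | nil => intro idx _; simp [pvExtract, pvAStart]
  | cons l ls ih =>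
      intro idx h
      have hidx : idx < full.length := by
        by_contra hc
        simp [List.drop_eq_nil_of_le (Nat.le_of_not_lt hc)] at h
      have hget : full[idx] = l := by
        have : (full.drop idx)[0]'(by rw [← h]; simp) = l := by simp [← h]
        simpa using this
      have hdrop : ls = full.drop (idx + 1) := by
        have : (full.drop idx).tail = full.drop (idx + 1) := by rw [List.tail_drop]
        rw [← this, ← h]; rfl
      by_cases hm : PySem.Str.isIn m l
      · simp only [pvExtract, pvAStart, hm, if_pos]
        rw [pvAEnd_eq_takeClose full idx ls (idx + 1) hdrop (by omega)]
        cases htc : pvTakeClose ls with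
        | none => simp
        | some out =>
            have h1 : (full.drop idx).take 1 = [l] := by
              rw [← h]; simp
            simp [h1]
      · simp only [pvExtract, pvAStart, hm, Bool.false_eq_true, if_false]
        exact ih (idx + 1) hdrop

-- ===== VERDICT (by name: the statement is the Claim_ definition above) =====
theorem extract_struct_block_py_spec : Claim_equal_extract_struct_block_py := by
  intro lines m _ _
  unfold Spec_extract_struct_block_py extract_struct_block_py extract_struct_block_py_alt
  rw [pvExtract_eq lines m lines 0 (by simp)]
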